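-- pv_equiv track=rewrite | github.com/Krupasurani/bank | src/ai_engine/enhanced_test_generator.py | _categorize_user_stories
-- ===== SOURCE A (Python) =====
-- from typing import Dict, List, Any, Optional
--
-- def _categorize_user_stories(user_stories: List[Dict]) -> Dict[str, int]:
--     """Categorize user stories by various attributes"""
--
--     categories = {
--         "by_complexity": {"High": 0, "Medium": 0, "Low": 0},
--         "by_domain": {},
--         "by_pacs008_relevance": {"High": 0, "Medium": 0, "Low": 0, "None": 0}
--     }
--
--     for story in user_stories:
--         # Complexity
--         complexity = story.get('complexity', 'Medium')
--         categories["by_complexity"][complexity] = categories["by_complexity"].get(complexity, 0) + 1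
--
--         # Domain
--         domain = story.get('domain_area', 'Unknown')
--         categories["by_domain"][domain] = categories["by_domain"].get(domain, 0) + 1
--
--         # PACS.008 relevance
--         pacs008_rel = story.get('pacs008_relevance', 'None')
--         categories["by_pacs008_relevance"][pacs008_rel] = categories["by_pacs008_relevance"].get(pacs008_rel, 0) + 1
--
--     return categories
-- ===== SOURCE B (Python) =====
-- def _count(values):
--     """Count occurrences of each value, in first-occurrence order."""
--     counts = {}
--     for v in values:
--         counts[v] = counts.get(v, 0) + 1
--     return counts
--
--
-- def _categorize_user_stories(user_stories):
--     complexity = _count(s.get('complexity', 'Medium') for s in user_stories)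
--     domain = _count(s.get('domain_area', 'Unknown') for s in user_stories)
--     pacs = _count(s.get('pacs008_relevance', 'None') for s in user_stories)
--     return {
--         "by_complexity": {**{"High": 0, "Medium": 0, "Low": 0}, **complexity},
--         "by_domain": domain,
--         "by_pacs008_relevance": {**{"High": 0, "Medium": 0, "Low": 0, "None": 0}, **pacs},
--     }
-- ===== Notes on version B (the rewrite author's own statement) =====
-- stated objective: idiomatic
-- what changed: The single fused loop that updates three category dicts in lockstep is replaced by three independent counting passes (a shared Counter-style helper applied to each projected attribute stream) whose results are merged onto their zero baselines with dict unpacking.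
import Mathlib
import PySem

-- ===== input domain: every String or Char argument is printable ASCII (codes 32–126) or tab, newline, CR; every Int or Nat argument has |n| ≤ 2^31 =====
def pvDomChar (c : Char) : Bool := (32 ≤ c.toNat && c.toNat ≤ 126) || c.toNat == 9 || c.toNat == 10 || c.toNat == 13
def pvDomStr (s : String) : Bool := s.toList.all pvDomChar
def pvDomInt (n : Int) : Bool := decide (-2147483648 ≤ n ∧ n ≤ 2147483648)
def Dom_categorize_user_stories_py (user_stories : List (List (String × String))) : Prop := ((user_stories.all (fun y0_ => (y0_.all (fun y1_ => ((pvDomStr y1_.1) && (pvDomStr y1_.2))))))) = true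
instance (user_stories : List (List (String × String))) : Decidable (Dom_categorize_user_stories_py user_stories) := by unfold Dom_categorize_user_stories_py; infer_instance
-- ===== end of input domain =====

-- B replaces A's single fused counting loop by three independent counting passes merged onto zero baselines (idiomatic decomposition; same cost).


-- ===== PORT A =====
-- story.get(key, dflt): the input dict arrives as an association list (first match wins).
def pvGet (story : List (String × String)) (k dflt : String) : String :=
  (PySem.Dict.mk story).getD k dflt

def categorize_user_stories_py (user_stories : List (List (String × String))) : List (String × List (String × Int)) :=
  let init : PySem.Dict String Int × PySem.Dict String Int × PySem.Dict String Int :=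
    (PySem.Dict.mk [("High", 0), ("Medium", 0), ("Low", 0)],
     PySem.Dict.empty,
     PySem.Dict.mk [("High", 0), ("Medium", 0), ("Low", 0), ("None", 0)])
  let fin := user_stories.foldl (fun st story =>
    (let complexity := pvGet story "complexity" "Medium"
     st.1.insert complexity (st.1.getD complexity 0 + 1),
     let domain := pvGet story "domain_area" "Unknown"
     st.2.1.insert domain (st.2.1.getD domain 0 + 1),
     let pacs := pvGet story "pacs008_relevance" "None"
     st.2.2.insert pacs (st.2.2.getD pacs 0 + 1))) init
  [("by_complexity", fin.1.items), ("by_domain", fin.2.1.items),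
   ("by_pacs008_relevance", fin.2.2.items)]

-- ===== PORT B =====
-- _count(values): a Counter built with a plain dict
def pvCount (values : List String) : PySem.Dict String Int :=
  values.foldl (fun c v => c.insert v (c.getD v 0 + 1)) PySem.Dict.empty

-- {**base, **cnt}: unpack cnt's items onto base
def pvMergeOnto (base cnt : PySem.Dict String Int) : PySem.Dict String Int :=
  cnt.items.foldl (fun a kv => a.insert kv.1 kv.2) base

def categorize_user_stories_py_alt (user_stories : List (List (String × String))) : List (String × List (String × Int)) :=
  let complexity := pvCount (user_stories.map (fun s => pvGet s "complexity" "Medium"))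
  let domain := pvCount (user_stories.map (fun s => pvGet s "domain_area" "Unknown"))
  let pacs := pvCount (user_stories.map (fun s => pvGet s "pacs008_relevance" "None"))
  [("by_complexity", (pvMergeOnto (PySem.Dict.mk [("High", 0), ("Medium", 0), ("Low", 0)]) complexity).items),
   ("by_domain", domain.items),
   ("by_pacs008_relevance", (pvMergeOnto (PySem.Dict.mk [("High", 0), ("Medium", 0), ("Low", 0), ("None", 0)]) pacs).items)]

-- ===== PRECONDITION & SPEC =====
def Spec_categorize_user_stories_py (user_stories : List (List (String × String))) (out : List (String × List (String × Int))) : Prop := out = categorize_user_stories_py_alt user_stories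
instance (user_stories : List (List (String × String))) (out : List (String × List (String × Int))) : Decidable (Spec_categorize_user_stories_py user_stories out) := by unfold Spec_categorize_user_stories_py; infer_instance

-- ===== CLAIM (what is proved, stated in full; the proofs are below) =====
def Claim_equal_categorize_user_stories_py : Prop := ∀ (user_stories : List (List (String × String))), Dom_categorize_user_stories_py user_stories → Spec_categorize_user_stories_py user_stories (categorize_user_stories_py user_stories)

-- ===== LEMMAS AND PROOFS =====

-- Loop fission: A's fused counting fold over the triple state is the triple of the three
-- independent counting folds, one per key-extraction function.
theorem pv_fission {σ : Type} (l : List σ) (k1 k2 k3 : σ → String)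
    (a b c : PySem.Dict String Int) :
    l.foldl (fun st x =>
        (st.1.insert (k1 x) (st.1.getD (k1 x) 0 + 1),
         st.2.1.insert (k2 x) (st.2.1.getD (k2 x) 0 + 1),
         st.2.2.insert (k3 x) (st.2.2.getD (k3 x) 0 + 1))) (a, b, c)
      = (l.foldl (fun d x => d.insert (k1 x) (d.getD (k1 x) 0 + 1)) a,
         l.foldl (fun d x => d.insert (k2 x) (d.getD (k2 x) 0 + 1)) b,
         l.foldl (fun d x => d.insert (k3 x) (d.getD (k3 x) 0 + 1)) c) := by
  induction l generalizing a b c with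
  | nil => rfl
  | cons p l ih => simp [List.foldl, ih]

-- getD after unpacking pairs whose keys avoid k is unchanged.
theorem pv_getD_merge_not_mem (l : List (String × Int)) (d : PySem.Dict String Int)
    (k : String) (hk : k ∉ l.map Prod.fst) :
    (l.foldl (fun a kv => a.insert kv.1 kv.2) d).getD k 0 = d.getD k 0 := by
  induction l generalizing d with
  | nil => rfl
  | cons p l ih =>
    simp only [List.map_cons, List.mem_cons, not_or] at hk
    simp only [List.foldl_cons]
    rw [ih _ hk.2, PySem.Dict.getD_insert_of_ne _ _ _ hk.1]

-- getD after unpacking a nodup-keyed pair list: the pair's value if k occurs, else the base's.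
theorem pv_getD_merge (l : List (String × Int)) (d : PySem.Dict String Int)
    (k : String) (hnd : (l.map Prod.fst).Nodup) :
    (l.foldl (fun a kv => a.insert kv.1 kv.2) d).getD k 0
      = match l.find? (fun kv => kv.1 == k) with
        | some kv => kv.2
        | none => d.getD k 0 := by
  induction l generalizing d with
  | nil => rfl
  | cons p l ih =>
    simp only [List.map_cons, List.nodup_cons] at hnd
    simp only [List.foldl_cons, List.find?]
    by_cases hk : p.1 = k
    · subst hk
      simp only [BEq.rfl]
      rw [pv_getD_merge_not_mem _ _ _ hnd.1, PySem.Dict.getD_insert_self]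
    · have : (p.1 == k) = false := by simp [hk]
      rw [this, ih _ hnd.2]
      cases l.find? (fun kv => kv.1 == k) with
      | some kv => rfl
      | none => exact PySem.Dict.getD_insert_of_ne _ _ _ (fun e => hk e.symm)

-- Key lemma: counting into a dict whose every getD-at-0 is 0 equals merging the fresh counter onto it.
theorem pv_count_eq_merge (xs : List String) (base : PySem.Dict String Int)
    (hnd : base.keys.Nodup) (h0 : ∀ k, base.getD k 0 = 0) :
    xs.foldl (fun d v => d.insert v (d.getD v 0 + 1)) base = pvMergeOnto base (pvCount xs) := by
  have hkeysC : (pvCount xs).keys = PySem.Set.ofList xs := by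
    unfold pvCount
    rw [PySem.Dict.keys_foldl_insert]
    simp [PySem.Set.update_nil_left]
  have hndC : (pvCount xs).keys.Nodup := by
    rw [hkeysC]; exact PySem.Set.nodup_ofList xs
  have hgetC : ∀ k, (pvCount xs).getD k 0 = (xs.count k : Int) := by
    intro k
    unfold pvCount
    rw [PySem.Dict.getD_foldl_insert_add_one]
    simp
  -- LHS keys
  have hkeysL : (xs.foldl (fun d v => d.insert v (d.getD v 0 + 1)) base).keys
      = PySem.Set.update base.keys xs := PySem.Dict.keys_foldl_insert xs _ base
  have hndL : (xs.foldl (fun d v => d.insert v (d.getD v 0 + 1)) base).keys.Nodup :=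
    PySem.Dict.nodup_keys_foldl_insert xs _ base hnd
  -- RHS keys
  have hkeysR : (pvMergeOnto base (pvCount xs)).keys
      = PySem.Set.update base.keys xs := by
    unfold pvMergeOnto
    rw [PySem.Dict.keys_foldl_insert_key ((pvCount xs).items) Prod.fst (fun _ kv => kv.2) base]
    have : (pvCount xs).items.map Prod.fst = (pvCount xs).keys := rfl
    rw [this, hkeysC]
    rw [PySem.Set.update_eq_append_filter, PySem.Set.update_eq_append_filter,
      PySem.Set.ofList_ofList]
  have hndR : (pvMergeOnto base (pvCount xs)).keys.Nodup := by
    unfold pvMergeOnto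
    exact PySem.Dict.nodup_keys_foldl_insert_key _ Prod.fst _ base hnd
  -- getD agreement everywhere
  have hget : ∀ k, (xs.foldl (fun d v => d.insert v (d.getD v 0 + 1)) base).getD k 0
      = (pvMergeOnto base (pvCount xs)).getD k 0 := by
    intro k
    rw [PySem.Dict.getD_foldl_insert_add_one, h0 k]
    unfold pvMergeOnto
    rw [pv_getD_merge _ _ _ hndC]
    cases hf : (pvCount xs).items.find? (fun kv => kv.1 == k) with
    | some kv =>
      have hg : (pvCount xs).get? k = some kv.2 := by
        simp [PySem.Dict.get?, hf]
      have := PySem.Dict.getD_of_get?_eq_some _ (0 : Int) hg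
      rw [hgetC k] at this
      simp [← this]
    | none =>
      have hg : (pvCount xs).get? k = none := by
        simp [PySem.Dict.get?, hf]
      have hkm : k ∉ (pvCount xs).keys := (PySem.Dict.get?_eq_none_iff_not_mem_keys _ _).mp hg
      rw [hkeysC] at hkm
      have : k ∉ xs := fun hmem => hkm ((PySem.Set.mem_ofList xs k).mpr hmem)
      simp [List.count_eq_zero_of_not_mem this, h0 k]
  apply PySem.Dict.ext
  rw [PySem.Dict.items_eq_map_keys _ hndL 0, PySem.Dict.items_eq_map_keys _ hndR 0, hkeysL, hkeysR]
  exact List.map_congr_left (fun k _ => by rw [hget k])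

-- pv_count_eq_merge, restated for a counting fold that extracts its key from each element
theorem pv_count_eq_merge_key {σ : Type} (xs : List σ) (key : σ → String)
    (base : PySem.Dict String Int) (hnd : base.keys.Nodup) (h0 : ∀ k, base.getD k 0 = 0) :
    xs.foldl (fun d s => d.insert (key s) (d.getD (key s) 0 + 1)) base
      = pvMergeOnto base (pvCount (xs.map key)) := by
  have h := pv_count_eq_merge (xs.map key) base hnd h0
  simp only [List.foldl_map] at h
  exact h

-- the middle component: a counting fold from the empty dict is pvCount of the key stream
theorem pv_count_key {σ : Type} (xs : List σ) (key : σ → String) :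
    xs.foldl (fun d s => d.insert (key s) (d.getD (key s) 0 + 1)) PySem.Dict.empty
      = pvCount (xs.map key) := by
  unfold pvCount
  simp only [List.foldl_map]

-- the two literal baselines satisfy pv_count_eq_merge's hypotheses
theorem pv_base3_nodup : (PySem.Dict.mk (κ := String) (ν := Int) [("High", 0), ("Medium", 0), ("Low", 0)]).keys.Nodup := by decide
theorem pv_base4_nodup : (PySem.Dict.mk (κ := String) (ν := Int) [("High", 0), ("Medium", 0), ("Low", 0), ("None", 0)]).keys.Nodup := by decide
theorem pv_base3_zero : ∀ k, (PySem.Dict.mk (κ := String) (ν := Int) [("High", 0), ("Medium", 0), ("Low", 0)]).getD k 0 = 0 := by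
  intro k
  simp only [PySem.Dict.getD, PySem.Dict.get?, List.find?]
  repeat' first | rfl | split
theorem pv_base4_zero : ∀ k, (PySem.Dict.mk (κ := String) (ν := Int) [("High", 0), ("Medium", 0), ("Low", 0), ("None", 0)]).getD k 0 = 0 := by
  intro k
  simp only [PySem.Dict.getD, PySem.Dict.get?, List.find?]
  repeat' first | rfl | split

-- ===== VERDICT (by name: the statement is the Claim_ definition above) =====
theorem categorize_user_stories_py_spec : Claim_equal_categorize_user_stories_py := by
  intro us _
  unfold Spec_categorize_user_stories_py categorize_user_stories_py categorize_user_stories_py_alt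
  simp only []
  rw [pv_fission us (fun s => pvGet s "complexity" "Medium")
        (fun s => pvGet s "domain_area" "Unknown") (fun s => pvGet s "pacs008_relevance" "None")]
  rw [pv_count_key us (fun s => pvGet s "domain_area" "Unknown"),
      pv_count_eq_merge_key us (fun s => pvGet s "complexity" "Medium") _ pv_base3_nodup pv_base3_zero,
      pv_count_eq_merge_key us (fun s => pvGet s "pacs008_relevance" "None") _ pv_base4_nodup pv_base4_zero]
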